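-- pv_equiv track=rewrite | github.com/Hohlas/Ranger | modules/sol_wallet.py | _get_error_reason
-- ===== SOURCE A (Python) =====
-- def _get_error_reason(logs: list):
--     fails_list = [
--         "Program log: Error: ",
--         "Program log: AnchorError occurred. ",
--         "Program log: AnchorError caused by account: "
--     ]
--     advanced_errors = []
--     for log in logs:
--         for fail_msg in fails_list:
--             # if log.startswith(fail_msg) or "compute units" in log:
--             if log.startswith(fail_msg):
--                 return log.removeprefix(fail_msg)
--             elif "compute units" in log:
--                 advanced_errors.append(log)
--
--     if advanced_errors: return advanced_errors[-1]
--     return logs[-1]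
-- ===== SOURCE B (Python) =====
-- def _get_error_reason(logs: list):
--     fails_list = [
--         "Program log: Error: ",
--         "Program log: AnchorError occurred. ",
--         "Program log: AnchorError caused by account: "
--     ]
--     # pass 1: first log starting with a known failure prefix wins
--     for log in logs:
--         p = next((p for p in fails_list if log.startswith(p)), None)
--         if p is not None:
--             return log.removeprefix(p)
--     # pass 2: last "compute units" log, else last log
--     compute = [log for log in logs if "compute units" in log]
--     return compute[-1] if compute else logs[-1]
-- ===== Notes on version B (the rewrite author's own statement) =====
-- stated objective: simpler
-- what changed: Replaced A's single interleaved loop with a running advanced_errors accumulator (which appends each 'compute units' log once per non-matching prefix) by two distinct passes: a prefix-match scan that returns immediately, then a filter comprehension whose last element is the fallback.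
import Mathlib
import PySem

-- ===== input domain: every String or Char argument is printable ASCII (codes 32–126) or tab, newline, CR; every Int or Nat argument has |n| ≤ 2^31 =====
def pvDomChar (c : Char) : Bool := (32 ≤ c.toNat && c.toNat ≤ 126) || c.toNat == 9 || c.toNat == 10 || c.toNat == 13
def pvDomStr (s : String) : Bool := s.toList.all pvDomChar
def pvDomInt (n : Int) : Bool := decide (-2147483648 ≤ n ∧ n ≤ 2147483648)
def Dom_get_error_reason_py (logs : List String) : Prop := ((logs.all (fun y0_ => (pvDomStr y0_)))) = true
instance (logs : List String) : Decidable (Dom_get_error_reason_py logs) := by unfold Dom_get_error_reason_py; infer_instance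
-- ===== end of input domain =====

-- B replaces A's interleaved loop-with-accumulator by two separate passes (prefix scan, then a
-- 'compute units' filter for the fallback); objective: simpler.

-- ===== PORT A =====
def pvFails : List String :=
  ["Program log: Error: ",
   "Program log: AnchorError occurred. ",
   "Program log: AnchorError caused by account: "]

-- hand port of log.removeprefix(p); exact in every use site, which is guarded by startswith
def pvRemovePrefix (s p : String) : String :=
  if PySem.Str.startswith s p then String.ofList (s.toList.drop p.toList.length) else s

-- the inner 'for fail_msg in fails_list' loop of A (returns some = early return)
def pvInnerA (log : String) (acc : List String) : List String → Option String × List String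
  | [] => (none, acc)
  | f :: rest =>
    if PySem.Str.startswith log f then (some (pvRemovePrefix log f), acc)
    else if PySem.Str.isIn "compute units" log then pvInnerA log (acc ++ [log]) rest
    else pvInnerA log acc rest

-- the outer 'for log in logs' loop of A, threading advanced_errors
def pvOuterA (acc : List String) : List String → Option String × List String
  | [] => (none, acc)
  | log :: rest =>
    match pvInnerA log acc pvFails with
    | (some r, acc') => (some r, acc')
    | (none, acc') => pvOuterA acc' rest

def get_error_reason_py (logs : List String) : String :=
  match pvOuterA [] logs with
  | (some r, _) => r
  | (none, adv) =>
    if adv ≠ [] then (PySem.List.pyGet? adv (-1)).getD ""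
    else (PySem.List.pyGet? logs (-1)).getD ""   -- logs[-1]; Pre_ excludes logs = []

-- ===== PORT B =====
-- next((p for p in fails_list if log.startswith(p)), None)
def pvFindPrefix (log : String) : List String → Option String
  | [] => none
  | p :: rest => if PySem.Str.startswith log p then some p else pvFindPrefix log rest

-- pass 1 of Source B: first log matching a prefix returns immediately
def pvFirstMatch : List String → Option String
  | [] => none
  | log :: rest =>
    match pvFindPrefix log pvFails with
    | some p => some (pvRemovePrefix log p)
    | none => pvFirstMatch rest

def get_error_reason_py_alt (logs : List String) : String :=
  match pvFirstMatch logs with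
  | some r => r
  | none =>
    let compute := logs.filter (fun l => PySem.Str.isIn "compute units" l)
    if compute ≠ [] then (PySem.List.pyGet? compute (-1)).getD ""
    else (PySem.List.pyGet? logs (-1)).getD ""

-- ===== PRECONDITION & SPEC =====
-- Pre_ excludes only logs = [], on which the Python A raises IndexError at logs[-1].
def Pre_get_error_reason_py (logs : List String) : Prop := logs ≠ []
instance (logs : List String) : Decidable (Pre_get_error_reason_py logs) := by
  unfold Pre_get_error_reason_py; infer_instance

def pvWitness_get_error_reason_py : List String := ["abc"]

def Spec_get_error_reason_py (logs : List String) (out : String) : Prop := out = get_error_reason_py_alt logs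
instance (logs : List String) (out : String) : Decidable (Spec_get_error_reason_py logs out) := by unfold Spec_get_error_reason_py; infer_instance

-- ===== CLAIM (what is proved, stated in full; the proofs are below) =====
def Claim_equal_get_error_reason_py : Prop := ∀ (logs : List String), Dom_get_error_reason_py logs → Pre_get_error_reason_py logs → Spec_get_error_reason_py logs (get_error_reason_py logs)

-- ===== LEMMAS AND PROOFS =====

-- each non-returning log is appended once per prefix iff it mentions "compute units"
def pvBlow (l : String) : List String :=
  if PySem.Str.isIn "compute units" l then List.replicate 3 l else []

lemma innerA_fst (log : String) (acc fails : List String) :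
    (pvInnerA log acc fails).1 = (pvFindPrefix log fails).map (pvRemovePrefix log) := by
  induction fails generalizing acc with
  | nil => simp [pvInnerA, pvFindPrefix]
  | cons f rest ih =>
    simp only [pvInnerA, pvFindPrefix]
    split_ifs with h1 h2 <;> simp [ih]

lemma innerA_none (log : String) (acc : List String)
    (h : pvFindPrefix log pvFails = none) :
    pvInnerA log acc pvFails = (none, acc ++ pvBlow log) := by
  simp only [pvFails, pvFindPrefix] at h
  split_ifs at h with h1 h2 h3
  simp only [pvInnerA, pvBlow, pvFails, if_neg h1, if_neg h2, if_neg h3]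
  split_ifs with hc <;> simp [List.replicate, List.append_assoc]

lemma outerA_some (r : String) : ∀ (logs acc : List String),
    pvFirstMatch logs = some r → (pvOuterA acc logs).1 = some r := by
  intro logs
  induction logs with
  | nil => intro acc h; simp [pvFirstMatch] at h
  | cons log rest ih =>
    intro acc h
    simp only [pvFirstMatch] at h
    simp only [pvOuterA]
    cases hf : pvFindPrefix log pvFails with
    | some p =>
      rw [hf] at h
      have h1 := innerA_fst log acc pvFails
      rw [hf] at h1
      rcases he : pvInnerA log acc pvFails with ⟨o, acc'⟩
      rw [he] at h1
      simp only [Option.map_some] at h1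
      subst h1
      simpa using h
    | none =>
      rw [hf] at h
      rw [innerA_none log acc hf]
      exact ih _ h

lemma outerA_none : ∀ (logs acc : List String),
    pvFirstMatch logs = none → pvOuterA acc logs = (none, acc ++ logs.flatMap pvBlow) := by
  intro logs
  induction logs with
  | nil => intro acc _; simp [pvOuterA]
  | cons log rest ih =>
    intro acc h
    simp only [pvFirstMatch] at h
    cases hf : pvFindPrefix log pvFails with
    | some p => rw [hf] at h; simp at h
    | none =>
      rw [hf] at h
      simp only [pvOuterA, innerA_none log acc hf]
      rw [ih _ h]
      simp [List.append_assoc]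

lemma flat_last : ∀ (logs : List String),
    (logs.flatMap pvBlow).getLast? =
      (logs.filter (fun l => PySem.Str.isIn "compute units" l)).getLast? := by
  intro logs
  induction logs with
  | nil => simp
  | cons l rest ih =>
    simp only [List.flatMap_cons, List.filter_cons]
    cases hr : (rest.flatMap pvBlow).getLast? with
    | none =>
      have hre : rest.flatMap pvBlow = [] := List.getLast?_eq_none_iff.mp hr
      have hfe : rest.filter (fun l => PySem.Str.isIn "compute units" l) = [] :=
        List.getLast?_eq_none_iff.mp (by rw [← ih, hr])
      rw [hre, hfe, List.append_nil]
      unfold pvBlow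
      split_ifs with hc <;> simp [hc]
    | some x =>
      have hne : rest.flatMap pvBlow ≠ [] := by
        intro he; rw [he] at hr; simp at hr
      have hfne : rest.filter (fun l => PySem.Str.isIn "compute units" l) ≠ [] := by
        intro he
        have := ih; rw [he, hr] at this; simp at this
      rw [List.getLast?_append, hr]
      split_ifs with hc
      · rw [← List.singleton_append, List.getLast?_append, ← ih, hr]; rfl
      · rw [← ih, hr]; simp

-- ===== VERDICT (by name: the statement is the Claim_ definition above) =====
theorem get_error_reason_py_spec : Claim_equal_get_error_reason_py := by
  intro logs _ _
  unfold Spec_get_error_reason_py get_error_reason_py get_error_reason_py_alt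
  cases hm : pvFirstMatch logs with
  | some r =>
    have h1 := outerA_some r logs [] hm
    rcases he : pvOuterA [] logs with ⟨o, acc'⟩
    rw [he] at h1
    simp only at h1
    subst h1
    rfl
  | none =>
    rw [outerA_none logs [] hm]
    simp only [List.nil_append]
    have hl := flat_last logs
    by_cases hne : logs.filter (fun l => PySem.Str.isIn "compute units" l) = []
    · have hfe : logs.flatMap pvBlow = [] := by
        rw [hne] at hl
        exact List.getLast?_eq_none_iff.mp (by simpa using hl)
      rw [hfe, hne]
    · have hfne : logs.flatMap pvBlow ≠ [] := by
        intro he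
        rw [he] at hl
        exact hne (List.getLast?_eq_none_iff.mp hl.symm)
      rw [if_pos hfne, if_pos hne, PySem.List.pyGet?_neg_one, PySem.List.pyGet?_neg_one, hl]
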